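-- pv_equiv track=rewrite | github.com/CedricSanchezGithub/MSPR_M1_1 | scripts/classification/graphes_classification.py | find_resource
-- ===== SOURCE A (Python) =====
-- def find_resource(resources, keywords):
--     """Trouve la ressource la plus pertinente par mots-clés."""
--     kws = [k.lower() for k in keywords]
--     for res in resources:
--         title = res.get("title", "").lower()
--         if all(kw in title for kw in kws):
--             return res
--     for res in resources:
--         title = res.get("title", "").lower()
--         if any(kw in title for kw in kws):
--             return res
--     return resources[0] if resources else None
-- ===== SOURCE B (Python) =====
-- def find_resource(resources, keywords):
--     """Trouve la ressource la plus pertinente par mots-cles (single pass)."""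
--     kws = [k.lower() for k in keywords]
--     candidate = None
--     for res in resources:
--         title = res.get("title", "").lower()
--         if all(kw in title for kw in kws):
--             return res
--         if candidate is None and any(kw in title for kw in kws):
--             candidate = res
--     if candidate is not None:
--         return candidate
--     return resources[0] if resources else None
-- ===== Notes on version B (the rewrite author's own statement) =====
-- stated objective: alternative
-- what changed: Replaces A's two sequential passes over resources (all-match pass, then any-match pass) with a single pass that returns an all-match immediately and remembers the first any-match as a fallback candidate.
import Mathlib
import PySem

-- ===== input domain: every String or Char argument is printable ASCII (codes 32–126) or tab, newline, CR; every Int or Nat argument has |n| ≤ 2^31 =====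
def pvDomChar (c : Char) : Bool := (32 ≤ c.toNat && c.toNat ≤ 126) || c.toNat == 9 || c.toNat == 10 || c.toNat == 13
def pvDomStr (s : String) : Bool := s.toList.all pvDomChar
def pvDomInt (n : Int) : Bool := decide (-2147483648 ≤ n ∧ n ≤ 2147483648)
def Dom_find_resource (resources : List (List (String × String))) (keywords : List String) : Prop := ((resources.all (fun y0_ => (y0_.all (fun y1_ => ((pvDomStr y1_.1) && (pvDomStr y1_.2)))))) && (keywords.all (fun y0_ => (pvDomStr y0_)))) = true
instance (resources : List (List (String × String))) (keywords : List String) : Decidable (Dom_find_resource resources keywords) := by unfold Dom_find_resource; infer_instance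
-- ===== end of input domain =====

-- B replaces A's two sequential passes over resources with one pass that keeps the first
-- any-match as a fallback candidate (objective: alternative decomposition, one traversal).


-- ===== PORT A =====
-- res.get("title", "").lower()
-- dict parameter arrives as an association list (lookup = first match): res.get("title", "")
def pvTitle (res : List (String × String)) : String :=
  PySem.Str.lower ((List.lookup "title" res).getD "")

-- A: first pass (all keywords in title), then second pass (any keyword in title),
-- then resources[0] if resources else None.
def find_resource (resources : List (List (String × String))) (keywords : List String) : Option (List (String × String)) :=
  let kws := keywords.map PySem.Str.lower
  match resources.find? (fun res => kws.all (fun kw => PySem.Str.isIn kw (pvTitle res))) with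
  | some r => some r
  | none =>
    match resources.find? (fun res => kws.any (fun kw => PySem.Str.isIn kw (pvTitle res))) with
    | some r => some r
    | none => resources.head?

-- ===== PORT B =====
-- B's single loop: return an all-match at once, remember the first any-match.
def pvGoB (kws : List String) (candidate : Option (List (String × String))) :
    List (List (String × String)) → Option (List (String × String))
  | [] => candidate
  | res :: rest =>
    let title := pvTitle res
    if kws.all (fun kw => PySem.Str.isIn kw title) then some res
    else if candidate.isNone && kws.any (fun kw => PySem.Str.isIn kw title) then
      pvGoB kws (some res) rest
    else
      pvGoB kws candidate rest

def find_resource_alt (resources : List (List (String × String))) (keywords : List String) : Option (List (String × String)) :=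
  let kws := keywords.map PySem.Str.lower
  match pvGoB kws none resources with
  | some r => some r
  | none => resources.head?

-- ===== PRECONDITION & SPEC =====
def Spec_find_resource (resources : List (List (String × String))) (keywords : List String) (out : Option (List (String × String))) : Prop := out = find_resource_alt resources keywords
instance (resources : List (List (String × String))) (keywords : List String) (out : Option (List (String × String))) : Decidable (Spec_find_resource resources keywords out) := by unfold Spec_find_resource; infer_instance

-- ===== CLAIM (what is proved, stated in full; the proofs are below) =====
def Claim_equal_find_resource : Prop := ∀ (resources : List (List (String × String))) (keywords : List String), Dom_find_resource resources keywords → Spec_find_resource resources keywords (find_resource resources keywords)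

-- ===== LEMMAS AND PROOFS =====

-- once a candidate is saved, the loop only lets a later all-match override it
theorem pvGoB_some (kws : List String) (f : List (String × String))
    (l : List (List (String × String))) :
    pvGoB kws (some f) l =
      match l.find? (fun res => kws.all (fun kw => PySem.Str.isIn kw (pvTitle res))) with
      | some r => some r
      | none => some f := by
  induction l with
  | nil => rfl
  | cons res rest ih =>
    cases h : (kws.all (fun kw => PySem.Str.isIn kw (pvTitle res))) with
    | true => simp only [pvGoB, List.find?, h]; simp
    | false => simp only [pvGoB, List.find?, h, ih]; simp

-- with no candidate yet, the loop computes A's two passes in one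
theorem pvGoB_none (kws : List String) (l : List (List (String × String))) :
    pvGoB kws none l =
      match l.find? (fun res => kws.all (fun kw => PySem.Str.isIn kw (pvTitle res))) with
      | some r => some r
      | none => l.find? (fun res => kws.any (fun kw => PySem.Str.isIn kw (pvTitle res))) := by
  induction l with
  | nil => rfl
  | cons res rest ih =>
    cases hall : (kws.all (fun kw => PySem.Str.isIn kw (pvTitle res))) with
    | true => simp only [pvGoB, List.find?, hall]; simp
    | false =>
      cases hany : (kws.any (fun kw => PySem.Str.isIn kw (pvTitle res))) with
      | true => simp only [pvGoB, List.find?, hall, hany, pvGoB_some]; simp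
      | false => simp only [pvGoB, List.find?, hall, hany, ih]; simp

-- ===== VERDICT (by name: the statement is the Claim_ definition above) =====
theorem find_resource_spec : Claim_equal_find_resource := by
  intro resources keywords _
  unfold Spec_find_resource find_resource find_resource_alt
  simp only [pvGoB_none]
  cases List.find? (fun res => (List.map PySem.Str.lower keywords).all fun kw => PySem.Str.isIn kw (pvTitle res)) resources with
  | some r => rfl
  | none =>
    cases List.find? (fun res => (List.map PySem.Str.lower keywords).any fun kw => PySem.Str.isIn kw (pvTitle res)) resources <;> rfl
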